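-- pv_equiv track=rewrite | github.com/JuneJulyAugust/biobloom | src/biobloom/usabo_calibration_bank.py | _page_offsets
-- ===== SOURCE A (Python) =====
-- def _page_offsets(pages: list[tuple[int, str]]) -> tuple[str, list[tuple[int, int]]]:
--     chunks: list[str] = []
--     offsets: list[tuple[int, int]] = []
--     position = 0
--     for page_number, text in pages:
--         offsets.append((position, page_number))
--         chunks.append(text)
--         position += len(text) + 1
--     return "\n".join(chunks), offsets
-- ===== SOURCE B (Python) =====
-- def _page_offsets(pages: list[tuple[int, str]]) -> tuple[str, list[tuple[int, int]]]:
--     # Precompute the table of exclusive prefix sums of (len(text)+1), then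
--     # derive offsets by zipping it with the page numbers and the text by one join.
--     starts = [0]
--     for _, text in pages[:-1]:
--         starts.append(starts[-1] + len(text) + 1)
--     offsets = [(start, number) for start, (number, _) in zip(starts, pages)]
--     return "\n".join(text for _, text in pages), offsets
-- ===== Notes on version B (the rewrite author's own statement) =====
-- stated objective: idiomatic
-- what changed: Replaces A's single interleaved loop (running position, offsets and chunks built together) by a prefix-sum table of starts built first, then a zip comprehension for the offsets and one join over the texts.
import Mathlib
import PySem

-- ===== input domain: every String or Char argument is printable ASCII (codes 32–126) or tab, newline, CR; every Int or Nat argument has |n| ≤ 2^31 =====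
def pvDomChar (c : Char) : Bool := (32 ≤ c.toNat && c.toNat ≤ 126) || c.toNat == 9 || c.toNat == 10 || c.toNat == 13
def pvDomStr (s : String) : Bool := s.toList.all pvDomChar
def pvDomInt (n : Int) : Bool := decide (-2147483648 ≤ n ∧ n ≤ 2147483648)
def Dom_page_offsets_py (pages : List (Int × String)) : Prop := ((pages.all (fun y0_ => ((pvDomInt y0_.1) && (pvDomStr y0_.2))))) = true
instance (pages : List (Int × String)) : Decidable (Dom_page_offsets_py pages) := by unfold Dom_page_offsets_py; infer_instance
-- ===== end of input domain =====

-- B builds a prefix-sum table of start offsets first, then zips it with the page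
-- numbers and joins the texts, instead of A's single interleaved running-position loop.


-- ===== PORT A =====
-- one loop over pages keeping (chunks, offsets, position)
def page_offsets_py (pages : List (Int × String)) : String × (List (Int × Int)) :=
  let st := pages.foldl
    (fun (st : List String × List (Int × Int) × Int) pt =>
      (st.1 ++ [pt.2], st.2.1 ++ [(st.2.2, pt.1)], st.2.2 + PySem.Str.len pt.2 + 1))
    ([], [], 0)
  (PySem.Str.join "\n" st.1, st.2.1)

-- ===== PORT B =====
-- starts[-1] is PySem.List.pyGetD st (-1) 0: exact, the starts list is never empty
def page_offsets_py_alt (pages : List (Int × String)) : String × (List (Int × Int)) :=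
  let starts : List Int := (PySem.List.slice pages none (some (-1))).foldl
    (fun st pt => st ++ [PySem.List.pyGetD st (-1) 0 + PySem.Str.len pt.2 + 1]) [0]
  let offsets := (starts.zip pages).map (fun q => (q.1, q.2.1))
  (PySem.Str.join "\n" (pages.map (fun pt => pt.2)), offsets)

-- ===== PRECONDITION & SPEC =====
def Spec_page_offsets_py (pages : List (Int × String)) (out : String × (List (Int × Int))) : Prop := out = page_offsets_py_alt pages
instance (pages : List (Int × String)) (out : String × (List (Int × Int))) : Decidable (Spec_page_offsets_py pages out) := by unfold Spec_page_offsets_py; infer_instance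

-- ===== CLAIM (what is proved, stated in full; the proofs are below) =====
def Claim_equal_page_offsets_py : Prop := ∀ (pages : List (Int × String)), Dom_page_offsets_py pages → Spec_page_offsets_py pages (page_offsets_py pages)

-- ===== LEMMAS AND PROOFS =====

/-- reference offsets list: starting position of each page when joined with "\n" -/
def offsRef (p : Int) : List (Int × String) → List (Int × Int)
  | [] => []
  | (n, t) :: r => (p, n) :: offsRef (p + PySem.Str.len t + 1) r

/-- reference tail of the starts table (positions after the first) -/
def startsRef (p : Int) : List (Int × String) → List Int
  | [] => []
  | (_, t) :: r => (p + PySem.Str.len t + 1) :: startsRef (p + PySem.Str.len t + 1) r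

theorem foldA (l : List (Int × String)) (cs : List String) (os : List (Int × Int)) (p : Int) :
    l.foldl (fun (st : List String × List (Int × Int) × Int) pt =>
      (st.1 ++ [pt.2], st.2.1 ++ [(st.2.2, pt.1)], st.2.2 + PySem.Str.len pt.2 + 1)) (cs, os, p)
    = (cs ++ l.map Prod.snd, os ++ offsRef p l,
       p + (l.map (fun pt => PySem.Str.len pt.2 + 1)).sum) := by
  induction l generalizing cs os p with
  | nil => simp [offsRef]
  | cons hd tl ih =>
    obtain ⟨n, t⟩ := hd
    simp only [List.foldl_cons]
    rw [ih]
    simp [offsRef]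
    ring

theorem foldB (l : List (Int × String)) (st : List Int) (p : Int)
    (h : st ≠ []) (hp : PySem.List.pyGetD st (-1) 0 = p) :
    l.foldl (fun st pt => st ++ [PySem.List.pyGetD st (-1) 0 + PySem.Str.len pt.2 + 1]) st
    = st ++ startsRef p l := by
  induction l generalizing st p with
  | nil => simp [startsRef]
  | cons hd tl ih =>
    obtain ⟨n, t⟩ := hd
    simp only [List.foldl_cons, hp]
    rw [ih (st ++ [p + PySem.Str.len t + 1]) (p + PySem.Str.len t + 1) (by simp)
        (PySem.List.pyGetD_neg_one_append_singleton ..)]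
    simp [startsRef]

theorem zipLemma (l : List (Int × String)) (p : Int) :
    ((p :: startsRef p l.dropLast).zip l).map (fun q => (q.1, q.2.1)) = offsRef p l := by
  induction l generalizing p with
  | nil => simp [offsRef]
  | cons hd tl ih =>
    obtain ⟨n, t⟩ := hd
    cases tl with
    | nil => simp [offsRef, startsRef]
    | cons hd2 tl2 =>
      obtain ⟨m, u⟩ := hd2
      have h := ih (p + PySem.Str.len t + 1)
      simp only [List.dropLast_cons₂, startsRef, offsRef, List.zip_cons_cons,
        List.map_cons, List.cons.injEq, true_and] at h ⊢
      exact h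

-- ===== VERDICT (by name: the statement is the Claim_ definition above) =====
theorem page_offsets_py_spec : Claim_equal_page_offsets_py := by
  intro pages _
  unfold Spec_page_offsets_py page_offsets_py page_offsets_py_alt
  rw [foldA, PySem.List.slice_to_neg_one,
      foldB pages.dropLast [0] 0 (by simp) (by decide)]
  simp only [List.nil_append, List.singleton_append]
  rw [zipLemma pages 0]
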